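-- pv_equiv track=rewrite | github.com/the-omega-institute/automath | theory/2026_golden_ratio_driven_scan_projection_generation_recursive_emergence/scripts/common_interference_graph.py | split_blocks_radius2
-- ===== SOURCE A (Python) =====
-- from typing import Iterable, List, Sequence, Tuple
--
-- def split_blocks_radius2(positions: Sequence[int]) -> List[List[int]]:
--     """Split sorted positions into blocks by breakpoints (gap > 2)."""
--     if not positions:
--         return []
--     pos = list(int(p) for p in positions)
--     pos.sort()
--     blocks: List[List[int]] = []
--     cur: List[int] = []
--     for p in pos:
--         if not cur:
--             cur = [p]
--             continue
--         if p - cur[-1] <= 2: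
--             cur.append(p)
--         else:
--             blocks.append(cur)
--             cur = [p]
--     if cur:
--         blocks.append(cur)
--     return blocks
-- ===== SOURCE B (Python) =====
-- def split_blocks_radius2(positions):
--     """Staged passes: build the explicit table of breakpoint indices on the
--     sorted positions, then emit the blocks by slicing between consecutive
--     boundaries."""
--     if not positions:
--         return []
--     pos = sorted(int(p) for p in positions)
--     cuts = [i for i in range(1, len(pos)) if pos[i] - pos[i - 1] > 2]
--     bounds = [0] + cuts + [len(pos)]
--     return [pos[a:b] for a, b in zip(bounds, bounds[1:])]
-- ===== Notes on version B (the rewrite author's own statement) =====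
-- stated objective: alternative
-- what changed: B replaces A's single grow-and-flush grouping pass by staged passes: it first computes an explicit table of breakpoint indices (where the gap exceeds 2), forms the boundary list, and then emits each block by slicing the sorted array between consecutive boundaries.
import Mathlib
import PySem

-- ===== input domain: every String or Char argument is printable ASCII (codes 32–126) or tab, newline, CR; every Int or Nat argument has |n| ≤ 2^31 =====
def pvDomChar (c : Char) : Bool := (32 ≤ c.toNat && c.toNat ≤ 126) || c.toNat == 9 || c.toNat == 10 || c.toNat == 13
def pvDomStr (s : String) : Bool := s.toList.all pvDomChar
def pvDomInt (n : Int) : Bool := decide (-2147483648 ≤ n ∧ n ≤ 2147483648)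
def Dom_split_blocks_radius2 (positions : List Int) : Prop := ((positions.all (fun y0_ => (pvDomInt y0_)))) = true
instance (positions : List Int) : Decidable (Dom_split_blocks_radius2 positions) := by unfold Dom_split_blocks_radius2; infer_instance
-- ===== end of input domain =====

-- B replaces A's grow-and-flush grouping pass by staged passes: an explicit breakpoint-index
-- table is computed first, then blocks are emitted by slicing between consecutive boundaries;
-- objective: alternative decomposition (same asymptotic cost).

-- ===== PORT A =====
-- loop body of A: state (blocks, cur); cur[-1] is PySem.List.pyGetD st.2 (-1) 0
def astepA (st : List (List Int) × List Int) (p : Int) : List (List Int) × List Int :=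
  if st.2 = [] then (st.1, [p])
  else if p - PySem.List.pyGetD st.2 (-1) 0 ≤ 2 then (st.1, st.2 ++ [p])
  else (st.1 ++ [st.2], [p])

def split_blocks_radius2 (positions : List Int) : List (List Int) :=
  if positions = [] then []
  else
    let pos := PySem.List.sorted (positions.map (fun p => p)) (fun x => x) false
    let st := pos.foldl astepA ([], [])
    if st.2 = [] then st.1 else st.1 ++ [st.2]

-- ===== PORT B =====
-- Source B: cuts = [i for i in range(1, len(pos)) if pos[i] - pos[i-1] > 2];
-- bounds = [0] + cuts + [len(pos)]; [pos[a:b] for a, b in zip(bounds, bounds[1:])]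
def split_blocks_radius2_alt (positions : List Int) : List (List Int) :=
  if positions = [] then []
  else
    let pos := PySem.List.sorted (positions.map (fun p => p)) (fun x => x) false
    let cuts := (PySem.List.pyRange 1 (pos.length : Int) 1).filter
        (fun i => 2 < PySem.List.pyGetD pos i 0 - PySem.List.pyGetD pos (i - 1) 0)
    let bounds := 0 :: (cuts ++ [(pos.length : Int)])
    (bounds.zip bounds.tail).map (fun ab => PySem.List.slice pos (some ab.1) (some ab.2))

-- ===== PRECONDITION & SPEC =====
def Spec_split_blocks_radius2 (positions : List Int) (out : List (List Int)) : Prop := out = split_blocks_radius2_alt positions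
instance (positions : List Int) (out : List (List Int)) : Decidable (Spec_split_blocks_radius2 positions out) := by unfold Spec_split_blocks_radius2; infer_instance

-- ===== CLAIM (what is proved, stated in full; the proofs are below) =====
def Claim_equal_split_blocks_radius2 : Prop := ∀ (positions : List Int), Dom_split_blocks_radius2 positions → Spec_split_blocks_radius2 positions (split_blocks_radius2 positions)

-- ===== LEMMAS AND PROOFS =====

-- common recursive reference: merge p in front of the first block or open a new one
def mergeStep (blocks : List (List Int)) (p : Int) : List (List Int) :=
  match blocks with
  | (q :: b) :: bs => if q - p ≤ 2 then (p :: q :: b) :: bs else [p] :: (q :: b) :: bs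
  | _ => [p] :: blocks

def runB (l : List Int) : List (List Int) := l.reverse.foldl mergeStep []

theorem runB_cons (p : Int) (ps : List Int) : runB (p :: ps) = mergeStep (runB ps) p := by
  simp [runB, List.foldl_append]

-- ---------- A's fold equals runB (left-to-right consumption) ----------
def finishA (st : List (List Int) × List Int) : List (List Int) :=
  if st.2 = [] then st.1 else st.1 ++ [st.2]

def consumeA (cur l : List Int) : List (List Int) :=
  match l with
  | [] => [cur]
  | p :: ps =>
      if p - PySem.List.pyGetD cur (-1) 0 ≤ 2 then consumeA (cur ++ [p]) ps
      else cur :: consumeA [p] ps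

theorem foldl_finishA : ∀ (l : List Int) (blocks : List (List Int)) (cur : List Int),
    cur ≠ [] → finishA (l.foldl astepA (blocks, cur)) = blocks ++ consumeA cur l := by
  intro l
  induction l with
  | nil => intro blocks cur h; simp [finishA, consumeA, h]
  | cons p ps ih =>
    intro blocks cur h
    by_cases hgap : p - PySem.List.pyGetD cur (-1) 0 ≤ 2
    · simp only [List.foldl_cons, astepA, h, if_false, hgap, if_true, consumeA]
      exact ih blocks (cur ++ [p]) (by simp)
    · simp only [List.foldl_cons, astepA, h, if_false, hgap, consumeA]
      rw [ih (blocks ++ [cur]) [p] (by simp)]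
      simp

theorem consumeA_runB : ∀ (ps : List Int) (x : Int) (c : List Int),
    ∃ b bs, runB (x :: ps) = (x :: b) :: bs ∧ consumeA (c ++ [x]) ps = (c ++ x :: b) :: bs := by
  intro ps
  induction ps with
  | nil =>
    intro x c
    refine ⟨[], [], ?_, ?_⟩
    · simp [runB, mergeStep]
    · simp [consumeA]
  | cons p ps ih =>
    intro x c
    by_cases hgap : p - x ≤ 2
    · obtain ⟨b, bs, h1, h2⟩ := ih p (c ++ [x])
      refine ⟨p :: b, bs, ?_, ?_⟩
      · rw [runB_cons, h1]; simp [mergeStep, hgap]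
      · simp only [consumeA, PySem.List.pyGetD_neg_one_append_singleton, hgap, if_true]
        rw [h2]; simp
    · obtain ⟨b, bs, h1, h2⟩ := ih p []
      refine ⟨[], (p :: b) :: bs, ?_, ?_⟩
      · rw [runB_cons, h1]; simp [mergeStep, hgap]
      · simp only [consumeA, PySem.List.pyGetD_neg_one_append_singleton, hgap, if_false]
        simp only [List.nil_append] at h2
        rw [h2]

theorem finishA_eq_runB (l : List Int) :
    finishA (l.foldl astepA ([], [])) = runB l := by
  cases l with
  | nil => simp [finishA, runB]
  | cons p ps =>
    have hstep : astepA ([], []) p = ([], [p]) := by simp [astepA]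
    rw [List.foldl_cons, hstep, foldl_finishA ps [] [p] (by simp)]
    obtain ⟨b, bs, h1, h2⟩ := consumeA_runB ps p []
    simp only [List.nil_append] at h2 ⊢
    rw [h1, h2]

-- ---------- B's cut-table-and-slice computation equals runB ----------
def cutsOf (l : List Int) : List Int :=
  (PySem.List.pyRange 1 (l.length : Int) 1).filter
      (fun i => 2 < PySem.List.pyGetD l i 0 - PySem.List.pyGetD l (i - 1) 0)

def chunksFrom (l : List Int) (a : Int) (cs : List Int) : List (List Int) :=
  match cs with
  | [] => [PySem.List.slice l (some a) (some (l.length : Int))]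
  | c :: cs' => PySem.List.slice l (some a) (some c) :: chunksFrom l c cs'

theorem chunksFrom_nil (l : List Int) (a : Int) :
    chunksFrom l a [] = [PySem.List.slice l (some a) (some (l.length : Int))] := rfl

theorem chunksFrom_cons (l : List Int) (a c : Int) (cs : List Int) :
    chunksFrom l a (c :: cs) = PySem.List.slice l (some a) (some c) :: chunksFrom l c cs := rfl

def chunks (l : List Int) : List (List Int) :=
  let bounds := 0 :: (cutsOf l ++ [(l.length : Int)])
  (bounds.zip bounds.tail).map (fun ab => PySem.List.slice l (some ab.1) (some ab.2))

theorem zip_map_eq_chunksFrom (l : List Int) :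
    ∀ (cs : List Int) (a : Int),
    (((a :: (cs ++ [(l.length : Int)])).zip (cs ++ [(l.length : Int)])).map
        (fun ab => PySem.List.slice l (some ab.1) (some ab.2))) = chunksFrom l a cs := by
  intro cs
  induction cs with
  | nil => intro a; simp [chunksFrom]
  | cons c cs' ih =>
    intro a
    simp only [List.cons_append, List.zip_cons_cons, List.map_cons, chunksFrom_cons]
    congr 1
    exact ih c

theorem chunks_eq_chunksFrom (l : List Int) : chunks l = chunksFrom l 0 (cutsOf l) := by
  unfold chunks
  simp only [List.tail_cons]
  exact zip_map_eq_chunksFrom l (cutsOf l) 0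

theorem pyGetD_cons_of_pos (x : Int) (xs : List Int) (i : Int) (d : Int) (h : 0 < i) :
    PySem.List.pyGetD (x :: xs) i d = PySem.List.pyGetD xs (i - 1) d := by
  obtain ⟨k, hk⟩ := Int.eq_ofNat_of_zero_le (le_of_lt h)
  subst hk
  cases k with
  | zero => omega
  | succ m =>
    have h1 : ((m + 1 : Nat) : Int) - 1 = ((m : Nat) : Int) := by push_cast; ring
    rw [h1, PySem.List.pyGetD_natCast, PySem.List.pyGetD_natCast]
    simp

theorem cutsOf_nonneg (l : List Int) : ∀ c ∈ cutsOf l, 1 ≤ c := by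
  intro c hc
  have := List.mem_of_mem_filter hc
  exact (PySem.List.mem_pyRange_one.mp this).1

theorem pyRange_shift (a b : Int) :
    PySem.List.pyRange (a + 1) (b + 1) 1 = (PySem.List.pyRange a b 1).map (· + 1) := by
  rw [PySem.List.pyRange_one, PySem.List.pyRange_one]
  have h : (b + 1 - (a + 1)) = b - a := by ring
  rw [h, List.map_map]
  apply List.map_congr_left
  intro k _
  simp only [Function.comp_apply]
  ring

theorem cutsOf_cons (p q : Int) (rest : List Int) :
    cutsOf (p :: q :: rest) =
      (if 2 < q - p then [1] else []) ++ (cutsOf (q :: rest)).map (· + 1) := by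
  unfold cutsOf
  have hlen : (((p :: q :: rest).length : Nat) : Int) = (((q :: rest).length : Nat) : Int) + 1 := by
    simp
  rw [hlen]
  have h1 : (1 : Int) < (((q :: rest).length : Nat) : Int) + 1 := by
    have : (1 : Int) ≤ (((q :: rest).length : Nat) : Int) := by simp
    omega
  rw [PySem.List.pyRange_one_cons h1, List.filter_cons]
  have hP1 : (decide (2 < PySem.List.pyGetD (p :: q :: rest) 1 0 -
      PySem.List.pyGetD (p :: q :: rest) (1 - 1) 0)) = decide (2 < q - p) := by
    have e1 : PySem.List.pyGetD (p :: q :: rest) 1 0 = q := by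
      rw [pyGetD_cons_of_pos p (q :: rest) 1 0 (by norm_num)]
      norm_num [PySem.List.pyGetD_zero_cons]
    have e0 : PySem.List.pyGetD (p :: q :: rest) (1 - 1) 0 = p := by
      norm_num [PySem.List.pyGetD_zero_cons]
    rw [e1, e0]
  have hrest :
      List.filter (fun i => decide (2 < PySem.List.pyGetD (p :: q :: rest) i 0 -
          PySem.List.pyGetD (p :: q :: rest) (i - 1) 0))
        (PySem.List.pyRange (1 + 1) ((((q :: rest).length : Nat) : Int) + 1) 1) =
      (List.filter (fun i => decide (2 < PySem.List.pyGetD (q :: rest) i 0 -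
          PySem.List.pyGetD (q :: rest) (i - 1) 0))
        (PySem.List.pyRange 1 (((q :: rest).length : Nat) : Int) 1)).map (· + 1) := by
    rw [pyRange_shift, List.filter_map]
    congr 1
    apply List.filter_congr
    intro i hi
    have hib := PySem.List.mem_pyRange_one.mp hi
    simp only [Function.comp_apply]
    have e1 : PySem.List.pyGetD (p :: q :: rest) (i + 1) 0 = PySem.List.pyGetD (q :: rest) i 0 := by
      rw [pyGetD_cons_of_pos p (q :: rest) (i + 1) 0 (by omega)]
      congr 1; ring
    have e2 : PySem.List.pyGetD (p :: q :: rest) (i + 1 - 1) 0 =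
        PySem.List.pyGetD (q :: rest) (i - 1) 0 := by
      have h : i + 1 - 1 = i := by ring
      rw [h, pyGetD_cons_of_pos p (q :: rest) i 0 (by omega)]
    rw [e1, e2]
  rw [hP1, hrest]
  by_cases hgap : 2 < q - p
  · simp [hgap]
  · simp [hgap]

-- shifting all boundaries by one drops the head element
theorem slice_cons_shift (p : Int) (ps : List Int) (a b : Int) (ha : 0 ≤ a) (hb : 0 ≤ b) :
    PySem.List.slice (p :: ps) (some (a + 1)) (some (b + 1)) =
      PySem.List.slice ps (some a) (some b) := by
  rw [PySem.List.slice_toNat _ (by omega) (by omega), PySem.List.slice_toNat _ ha hb]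
  have h1 : (a + 1).toNat = a.toNat + 1 := by omega
  have h2 : (b + 1).toNat = b.toNat + 1 := by omega
  rw [h1, h2]
  simp [List.drop_succ_cons]

theorem slice_cons_head (p : Int) (ps : List Int) (b : Int) (hb : 0 ≤ b) :
    PySem.List.slice (p :: ps) (some 0) (some (b + 1)) =
      p :: PySem.List.slice ps (some 0) (some b) := by
  rw [PySem.List.slice_toNat _ (by omega) (by omega), PySem.List.slice_toNat _ le_rfl hb]
  have h2 : (b + 1).toNat = b.toNat + 1 := by omega
  simp [h2, List.take_succ_cons]

theorem chunksFrom_shift (p : Int) (ps : List Int) :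
    ∀ (cs : List Int) (a : Int), 0 ≤ a → (∀ c ∈ cs, 1 ≤ c) →
    chunksFrom (p :: ps) (a + 1) (cs.map (· + 1)) = chunksFrom ps a cs := by
  intro cs
  induction cs with
  | nil =>
    intro a ha _
    rw [List.map_nil, chunksFrom_nil, chunksFrom_nil]
    have hlen : (((p :: ps).length : Nat) : Int) = ((ps.length : Nat) : Int) + 1 := by simp
    rw [hlen, slice_cons_shift p ps a ((ps.length : Nat) : Int) ha (by positivity)]
  | cons c cs' ih =>
    intro a ha hcs
    rw [List.map_cons, chunksFrom_cons, chunksFrom_cons]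
    have hc : (1 : Int) ≤ c := hcs c List.mem_cons_self
    rw [slice_cons_shift p ps a c ha (by omega),
      ih c (by omega) (fun x hx => hcs x (List.mem_cons_of_mem _ hx))]

-- the head block of chunks starts with the head element
theorem chunksFrom_head (q : Int) (rest cs : List Int) (hcs : ∀ c ∈ cs, 1 ≤ c) :
    ∃ b bs, chunksFrom (q :: rest) 0 cs = (q :: b) :: bs := by
  cases cs with
  | nil =>
    refine ⟨PySem.List.slice rest (some 0) (some ((rest.length : Nat) : Int)), [], ?_⟩
    rw [chunksFrom_nil]
    have hlen : (((q :: rest).length : Nat) : Int) = ((rest.length : Nat) : Int) + 1 := by simp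
    rw [hlen, slice_cons_head q rest ((rest.length : Nat) : Int) (by positivity)]
  | cons c cs' =>
    have hc : (1 : Int) ≤ c := hcs c List.mem_cons_self
    refine ⟨PySem.List.slice rest (some 0) (some (c - 1)), chunksFrom (q :: rest) c cs', ?_⟩
    rw [chunksFrom_cons]
    have hs : PySem.List.slice (q :: rest) (some 0) (some c) =
        q :: PySem.List.slice rest (some 0) (some (c - 1)) := by
      have h := slice_cons_head q rest (c - 1) (by omega)
      rwa [show c - 1 + 1 = c by ring] at h
    rw [hs]

theorem chunks_cons (p : Int) (ps : List Int) (hne : ps ≠ []) :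
    chunks (p :: ps) = mergeStep (chunks ps) p := by
  obtain ⟨q, rest, rfl⟩ := List.exists_cons_of_ne_nil hne
  rw [chunks_eq_chunksFrom, chunks_eq_chunksFrom, cutsOf_cons]
  obtain ⟨b, bs, hhead⟩ := chunksFrom_head q rest (cutsOf (q :: rest)) (cutsOf_nonneg _)
  have hshift := chunksFrom_shift p (q :: rest)
  by_cases hgap : 2 < q - p
  · simp only [hgap, if_true, List.singleton_append]
    rw [chunksFrom_cons, hhead]
    simp only [mergeStep]
    have hle : ¬ (q - p ≤ 2) := by omega
    simp only [hle, if_false]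
    have hone : PySem.List.slice (p :: q :: rest) (some 0) (some 1) = [p] := by
      rw [PySem.List.slice_toNat _ le_rfl (by norm_num)]
      simp
    have h0 := hshift (cutsOf (q :: rest)) 0 le_rfl (cutsOf_nonneg _)
    rw [show (0 : Int) + 1 = 1 by ring] at h0
    rw [hone, h0, hhead]
  · have hle : q - p ≤ 2 := by omega
    simp only [hgap, if_false, List.nil_append]
    rw [hhead]
    simp only [mergeStep, hle, if_true]
    cases hcs : cutsOf (q :: rest) with
    | nil =>
      rw [hcs, chunksFrom_nil] at hhead
      rw [List.map_nil, chunksFrom_nil]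
      injection hhead with h1 h2

      have hlen : (((p :: q :: rest).length : Nat) : Int) = (((q :: rest).length : Nat) : Int) + 1 := by
        simp
      rw [hlen, slice_cons_head p (q :: rest) _ (by positivity), h1, ← h2]
    | cons c cs' =>
      have hc : (1 : Int) ≤ c := cutsOf_nonneg (q :: rest) c (hcs ▸ List.mem_cons_self)
      rw [hcs, chunksFrom_cons] at hhead
      rw [List.map_cons, chunksFrom_cons]
      injection hhead with h1 h2
      have hs : PySem.List.slice (p :: q :: rest) (some 0) (some (c + 1)) =
          p :: PySem.List.slice (q :: rest) (some 0) (some c) :=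
        slice_cons_head p (q :: rest) c (by omega)
      rw [hs, h1,
        hshift cs' c (by omega)
          (fun x hx => cutsOf_nonneg (q :: rest) x (by rw [hcs]; exact List.mem_cons_of_mem _ hx)),
        h2]

theorem chunks_eq_runB : ∀ (l : List Int), l ≠ [] → chunks l = runB l := by
  intro l
  induction l with
  | nil => intro h; exact absurd rfl h
  | cons p ps ih =>
    intro _
    cases ps with
    | nil =>
      rw [chunks_eq_chunksFrom]
      have hcuts : cutsOf [p] = [] := by
        unfold cutsOf
        rw [show ((([p] : List Int).length : Nat) : Int) = 1 by simp,
          PySem.List.pyRange_one_eq_nil le_rfl]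
        simp
      rw [hcuts, chunksFrom_nil]
      have hs : PySem.List.slice [p] (some 0) (some ((([p] : List Int).length : Nat) : Int)) = [p] := by
        rw [PySem.List.slice_toNat _ le_rfl (by positivity)]
        simp
      rw [hs]
      simp [runB, mergeStep]
    | cons q rest =>
      rw [chunks_cons p (q :: rest) (by simp), runB_cons, ih (by simp)]

-- ===== VERDICT (by name: the statement is the Claim_ definition above) =====
theorem split_blocks_radius2_spec : Claim_equal_split_blocks_radius2 := by
  intro positions _
  unfold Spec_split_blocks_radius2
  by_cases h : positions = []
  · subst h; decide
  · have hne : PySem.List.sorted (positions.map (fun p => p)) (fun x => x) false ≠ [] := by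
      intro hc
      have hperm := PySem.List.sorted_perm (positions.map (fun p => p)) (fun x => x) false
      rw [hc] at hperm
      have hmapnil := hperm.symm.eq_nil
      rw [List.map_eq_nil_iff] at hmapnil
      exact h hmapnil
    have hA : split_blocks_radius2 positions =
        finishA ((PySem.List.sorted (positions.map (fun p => p)) (fun x => x) false).foldl
          astepA ([], [])) := by
      simp only [split_blocks_radius2, h, if_false]
      rfl
    have hB : split_blocks_radius2_alt positions =
        chunks (PySem.List.sorted (positions.map (fun p => p)) (fun x => x) false) := by
      simp only [split_blocks_radius2_alt, h, if_false]
      rfl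
    rw [hA, hB, finishA_eq_runB, chunks_eq_runB _ hne]
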